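-- pv_equiv track=rewrite | github.com/Sravana-06/Coding | Difficulty: Medium/Elements in range [a, b]/elements-in-range-a-b.py | cntInRange
-- ===== SOURCE A (Python) =====
-- def cntInRange(arr, queries):
--     arr.sort()
--     import bisect
--
--     result = []
--     for a, b in queries:
--         left = bisect.bisect_left(arr, a)
--         right = bisect.bisect_right(arr, b)
--         result.append(right - left)
--
--     return result
-- ===== SOURCE B (Python) =====
-- def cntInRange(arr, queries):
--     # Direct counting: no sort, no binary search. (Does not mutate arr, unlike A.)
--     return [sum(1 for x in arr if x <= b) - sum(1 for x in arr if x < a)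
--             for a, b in queries]
-- ===== Notes on version B (the rewrite author's own statement) =====
-- stated objective: simpler
-- what changed: Replaces sort + per-query binary searches with a direct one-pass count per query (elements <= b minus elements < a), eliminating the sort and the bisect machinery; B does not mutate arr (equivalence is about the return value).
import Mathlib
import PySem

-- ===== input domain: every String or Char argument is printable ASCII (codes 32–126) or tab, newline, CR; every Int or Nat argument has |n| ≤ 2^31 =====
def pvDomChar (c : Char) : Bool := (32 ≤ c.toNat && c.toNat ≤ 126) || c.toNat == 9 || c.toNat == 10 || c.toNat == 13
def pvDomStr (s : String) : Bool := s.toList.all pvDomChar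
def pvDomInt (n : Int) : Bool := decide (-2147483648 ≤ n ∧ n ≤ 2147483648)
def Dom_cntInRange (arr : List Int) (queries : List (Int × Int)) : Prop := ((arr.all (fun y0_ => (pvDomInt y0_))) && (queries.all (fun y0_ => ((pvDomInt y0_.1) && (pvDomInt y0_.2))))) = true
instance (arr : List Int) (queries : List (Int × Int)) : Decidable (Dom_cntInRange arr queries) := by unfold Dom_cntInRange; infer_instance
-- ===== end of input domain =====

-- B replaces A's sort + per-query binary searches by a direct per-query count
-- (#elements ≤ b minus #elements < a); equivalence is about the RETURN value only:
-- A sorts arr in place, B does not mutate it.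

-- ===== PORT A =====
-- arr.sort(); for (a,b) in queries: append(bisect_right(arr,b) - bisect_left(arr,a))
def cntInRange (arr : List Int) (queries : List (Int × Int)) : List Int :=
  let s := PySem.List.sorted arr (fun x => x) false
  queries.foldl (fun result q =>
    let left := PySem.List.bisectLeft s q.1
    let right := PySem.List.bisectRight s q.2
    result ++ [(right : Int) - (left : Int)]) []

-- ===== PORT B =====
-- [sum(1 for x in arr if x <= b) - sum(1 for x in arr if x < a) for a,b in queries]
def cntInRange_alt (arr : List Int) (queries : List (Int × Int)) : List Int :=
  queries.map (fun q =>
    ((arr.countP (fun x => x ≤ q.2) : Int) - (arr.countP (fun x => x < q.1) : Int)))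

-- ===== PRECONDITION & SPEC =====
def Spec_cntInRange (arr : List Int) (queries : List (Int × Int)) (out : List Int) : Prop := out = cntInRange_alt arr queries
instance (arr : List Int) (queries : List (Int × Int)) (out : List Int) : Decidable (Spec_cntInRange arr queries out) := by unfold Spec_cntInRange; infer_instance

-- ===== CLAIM (what is proved, stated in full; the proofs are below) =====
def Claim_equal_cntInRange : Prop := ∀ (arr : List Int) (queries : List (Int × Int)), Dom_cntInRange arr queries → Spec_cntInRange arr queries (cntInRange arr queries)

-- ===== LEMMAS AND PROOFS =====

-- If p holds exactly on the first r positions of s, then countP p s = r.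
theorem countP_eq_of_boundary (p : Int → Bool) (s : List Int) (r : Nat) (hr : r ≤ s.length)
    (h1 : ∀ (j : Nat) (hj : j < s.length), j < r → p s[j])
    (h2 : ∀ (j : Nat) (hj : j < s.length), r ≤ j → ¬ p s[j]) :
    s.countP p = r := by
  have hsplit : s = s.take r ++ s.drop r := (List.take_append_drop r s).symm
  rw [hsplit, List.countP_append]
  have htake : (s.take r).countP p = (s.take r).length := by
    apply List.countP_eq_length.mpr
    intro a ha
    obtain ⟨j, hj, rfl⟩ := List.mem_iff_getElem.mp ha
    have hjr : j < r := lt_of_lt_of_le hj (by simp)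
    have hjs : j < s.length := lt_of_lt_of_le hj (by simp)
    have := h1 j hjs hjr
    simpa using this
  have hdrop : (s.drop r).countP p = 0 := by
    apply List.countP_eq_zero.mpr
    intro a ha
    obtain ⟨j, hj, rfl⟩ := List.mem_iff_getElem.mp ha
    have hjs : r + j < s.length := by
      have := hj; simp [List.length_drop] at this; omega
    have := h2 (r + j) hjs (Nat.le_add_right r j)
    simpa using this
  rw [htake, hdrop, List.length_take]
  omega

theorem bisectLeft_eq_countP (s : List Int) (a : Int)
    (hs : List.Pairwise (fun x1 x2 => x1 ≤ x2) s) :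
    PySem.List.bisectLeft s a = s.countP (fun x => x < a) := by
  obtain ⟨hle, h1, h2⟩ := PySem.List.bisectLeft_spec s a hs
  exact (countP_eq_of_boundary _ s _ hle
    (fun j hj hjr => by simpa using h1 j hj hjr)
    (fun j hj hjr => by simpa using not_lt.mpr (h2 j hj hjr))).symm

theorem bisectRight_eq_countP (s : List Int) (b : Int)
    (hs : List.Pairwise (fun x1 x2 => x1 ≤ x2) s) :
    PySem.List.bisectRight s b = s.countP (fun x => x ≤ b) := by
  obtain ⟨hle, h1, h2⟩ := PySem.List.bisectRight_spec s b hs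
  exact (countP_eq_of_boundary _ s _ hle
    (fun j hj hjr => by simpa using h1 j hj hjr)
    (fun j hj hjr => by simpa using not_le.mpr (h2 j hj hjr))).symm

-- A's append-loop over queries is the map of the per-query value.
theorem foldl_append_query (arr : List Int) (queries : List (Int × Int)) (acc : List Int) :
    queries.foldl (fun result q =>
      let left := PySem.List.bisectLeft (PySem.List.sorted arr (fun x => x) false) q.1
      let right := PySem.List.bisectRight (PySem.List.sorted arr (fun x => x) false) q.2
      result ++ [(right : Int) - (left : Int)]) acc
    = acc ++ queries.map (fun q =>
        ((PySem.List.bisectRight (PySem.List.sorted arr (fun x => x) false) q.2 : Int)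
          - (PySem.List.bisectLeft (PySem.List.sorted arr (fun x => x) false) q.1 : Int))) := by
  induction queries generalizing acc with
  | nil => simp
  | cons q qs ih => simp [List.foldl_cons, ih]

-- ===== VERDICT (by name: the statement is the Claim_ definition above) =====
theorem cntInRange_spec : Claim_equal_cntInRange := by
  intro arr queries _
  unfold Spec_cntInRange cntInRange cntInRange_alt
  rw [foldl_append_query, List.nil_append]
  apply List.map_congr_left
  intro q _
  have hs := PySem.List.sorted_pairwise (κ := Int) arr (fun x => x)
  have hperm := PySem.List.sorted_perm arr (fun x => x) false
  rw [bisectLeft_eq_countP _ _ hs, bisectRight_eq_countP _ _ hs,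
      hperm.countP_eq, hperm.countP_eq]
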